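-- pv_equiv track=rewrite | github.com/govardhananprabhu/DS-task- | thief jump.py | jumpcount
-- ===== SOURCE A (Python) =====
-- def jumpcount(x, y, n, height):
-- 	jumps = 0
--
-- 	for i in range(n):
-- 		if (height[i] <= x):
-- 			jumps += 1
-- 			continue
-- 		h = height[i]
-- 		while (h > x):
-- 			jumps += 1
-- 			h = h - (x - y)
-- 		jumps += 1
-- 	return jumps
-- ===== SOURCE B (Python) =====
-- def jumpcount(x, y, n, height):
--     d = x - y
--     total = 0
--     for h in height[:max(n, 0)]:
--         if h <= x:
--             total += 1
--         else:
--             total += (h - x + d - 1) // d + 1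
--     return total
-- ===== Notes on version B (the rewrite author's own statement) =====
-- stated objective: alternative
-- what changed: Replaces A's inner while-loop (one iteration per (x-y) of height) with the closed-form ceiling division ceil((h-x)/(x-y))+1 per height, iterating directly over the height prefix instead of over indices.
import Mathlib
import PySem

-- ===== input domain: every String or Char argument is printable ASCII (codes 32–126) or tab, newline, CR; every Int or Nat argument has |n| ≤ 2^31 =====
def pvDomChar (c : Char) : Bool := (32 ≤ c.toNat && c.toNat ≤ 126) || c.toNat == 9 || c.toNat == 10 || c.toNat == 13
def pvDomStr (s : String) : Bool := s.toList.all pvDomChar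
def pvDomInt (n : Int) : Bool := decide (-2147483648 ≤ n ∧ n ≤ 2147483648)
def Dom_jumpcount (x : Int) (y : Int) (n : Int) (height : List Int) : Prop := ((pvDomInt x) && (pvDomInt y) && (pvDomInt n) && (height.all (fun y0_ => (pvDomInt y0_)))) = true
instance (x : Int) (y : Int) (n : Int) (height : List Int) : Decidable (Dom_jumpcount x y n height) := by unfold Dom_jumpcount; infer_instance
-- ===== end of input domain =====

-- B replaces A's inner while-loop with a closed-form ceiling division per height and
-- iterates over the height prefix directly instead of over indices (alternative algorithm).


-- ===== PORT A =====
-- A's inner 'while h > x: jumps += 1; h = h - (x - y)'.  When ¬ y < x and h > x the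
-- Python loop diverges; that case is excluded by Pre_ (the 'y < x' guard below only
-- makes the recursion total and is never reached inside Pre_).
def jcWhile (x : Int) (y : Int) (h : Int) (j : Int) : Int :=
  if h > x then
    if y < x then jcWhile x y (h - (x - y)) (j + 1)
    else j
  else j
termination_by (h - x).toNat
decreasing_by omega

def jumpcount (x : Int) (y : Int) (n : Int) (height : List Int) : Int :=
  (PySem.List.pyRange 0 n 1).foldl (fun jumps i =>
    match PySem.List.pyGet? height i with
    | none => jumps  -- IndexError in Python; excluded by Pre_
    | some hi => if hi ≤ x then jumps + 1 else jcWhile x y hi jumps + 1) 0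

-- ===== PORT B =====
def jumpcount_alt (x : Int) (y : Int) (n : Int) (height : List Int) : Int :=
  let d := x - y
  (PySem.List.slice height none (some (max n 0))).foldl (fun total h =>
    if h ≤ x then total + 1
    else total + (PySem.Int.floordiv (h - x + d - 1) d + 1)) 0

-- ===== PRECONDITION & SPEC =====
-- Pre_ excludes exactly the inputs where A does not return: n > len(height)
-- (IndexError), and ¬ x > y while some height in the scanned prefix exceeds x
-- (A's while-loop diverges).
def Pre_jumpcount (x : Int) (y : Int) (n : Int) (height : List Int) : Prop :=
  n ≤ (height.length : Int) ∧ (y < x ∨ ∀ h ∈ height.take n.toNat, h ≤ x)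
instance (x : Int) (y : Int) (n : Int) (height : List Int) : Decidable (Pre_jumpcount x y n height) := by unfold Pre_jumpcount; infer_instance

def pvWitness_jumpcount : Int × Int × Int × List Int := (10, 1, 3, [5, 20, 12])

def Spec_jumpcount (x : Int) (y : Int) (n : Int) (height : List Int) (out : Int) : Prop := out = jumpcount_alt x y n height
instance (x : Int) (y : Int) (n : Int) (height : List Int) (out : Int) : Decidable (Spec_jumpcount x y n height out) := by unfold Spec_jumpcount; infer_instance

-- ===== CLAIM (what is proved, stated in full; the proofs are below) =====
def Claim_equal_jumpcount : Prop := ∀ (x : Int) (y : Int) (n : Int) (height : List Int), Dom_jumpcount x y n height → Pre_jumpcount x y n height → Spec_jumpcount x y n height (jumpcount x y n height)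

-- ===== LEMMAS AND PROOFS =====

-- Closed form of A's inner loop: it adds ceil((h-x)/(x-y)) = (h-x+(x-y)-1)//(x-y) jumps.
theorem jcWhile_closed (x y h j : Int) (hxy : y < x) (hh : x < h) :
    jcWhile x y h j = j + PySem.Int.floordiv (h - x + (x - y) - 1) (x - y) := by
  rw [jcWhile]
  simp only [if_pos hh, if_pos hxy, gt_iff_lt]
  by_cases h2 : h - (x - y) > x
  · rw [jcWhile_closed x y _ _ hxy h2]
    rw [PySem.Int.floordiv_eq_ediv_of_pos (by omega), PySem.Int.floordiv_eq_ediv_of_pos (by omega)]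
    have hsplit : h - x + (x - y) - 1 = (h - (x - y) - x + (x - y) - 1) + 1 * (x - y) := by ring
    rw [hsplit, Int.add_mul_ediv_right _ _ (by omega : x - y ≠ 0)]
    ring
  · rw [jcWhile, if_neg h2]
    have h1 : PySem.Int.floordiv (h - x + (x - y) - 1) (x - y) = 1 := by
      rw [PySem.Int.floordiv_eq_iff_of_pos (by omega)]
      constructor <;> omega
    omega
termination_by (h - x).toNat
decreasing_by omega

theorem jumpcount_spec : Claim_equal_jumpcount := by
  intro x y n height _ hpre
  obtain ⟨hlen, hcase⟩ := hpre
  simp only [Spec_jumpcount, jumpcount, jumpcount_alt]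
  have hmax : (max n 0) = ((n.toNat : Nat) : Int) := by omega
  rw [hmax, PySem.List.slice_to_natCast]
  set xs := height.take n.toNat with hxs
  have hxslen : xs.length = n.toNat := by
    simp [hxs, List.length_take]; omega
  by_cases hn : n ≤ 0
  · rw [PySem.List.pyRange_one_eq_nil (by omega)]
    have h0 : n.toNat = 0 := by omega
    simp [hxs, h0]
  · have hstep : ∀ (acc : Int), ∀ i ∈ PySem.List.pyRange 0 n 1,
        (fun jumps i =>
          match PySem.List.pyGet? height i with
          | none => jumps
          | some hi => if hi ≤ x then jumps + 1 else jcWhile x y hi jumps + 1) acc i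
        = (fun total i =>
            (fun total h => if h ≤ x then total + 1
              else total + (PySem.Int.floordiv (h - x + (x - y) - 1) (x - y) + 1)) total
              (PySem.List.pyGetD xs i 0)) acc i := by
      intro acc i hi
      rw [PySem.List.mem_pyRange_one] at hi
      have hilen : i < (height.length : Int) := by omega
      have hixs : i < (xs.length : Int) := by omega
      have hget : PySem.List.pyGet? height i = some (height[i.toNat]'(by omega)) :=
        PySem.List.pyGet?_eq_some_getElem height hi.1 hilen
      have higet : PySem.List.pyGetD xs i 0 = xs[i.toNat]'(by omega) :=
        PySem.List.pyGetD_eq_getElem xs 0 hi.1 hixs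
      have hsame : xs[i.toNat]'(by omega) = height[i.toNat]'(by omega) := by
        simp [hxs, List.getElem_take]
      simp only [hget, higet, hsame]
      by_cases hle : height[i.toNat]'(by omega) ≤ x
      · simp [hle]
      · have hyx : y < x := by
          rcases hcase with hc | hc
          · exact hc
          · exfalso
            have hm : height[i.toNat]'(by omega) ∈ xs := by
              rw [← hsame]; exact List.getElem_mem _
            exact absurd (hc _ hm) (not_le.mpr (not_le.mp hle))
        simp only [if_neg hle]
        rw [jcWhile_closed x y _ _ hyx (by omega)]
        ring
    rw [PySem.List.foldl_congr_mem _ _ _ _ hstep]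
    have hb : n = PySem.List.len xs := by rw [PySem.List.len_eq]; omega
    rw [hb]
    exact PySem.List.foldl_pyRange_zero_pyGetD xs 0 (fun total h => if h ≤ x then total + 1 else total + (PySem.Int.floordiv (h - x + (x - y) - 1) (x - y) + 1)) (0 : Int)

-- ===== VERDICT: the theorem jumpcount_spec above proves Claim_equal_jumpcount =====
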